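-- pv_equiv track=rewrite | github.com/acmi-lab/pretraining-with-nonsense | calculate_rouge.py | break_at_periods
-- ===== SOURCE A (Python) =====
-- def break_at_periods(s):
--     lines = []
--     prev = 0
--     period_indices = [i for (i,ch) in enumerate(s) if ch=="."]
--     for elem in period_indices:
--         lines.append(s[prev:elem+1])
--         prev=elem+1
--     return lines
-- ===== SOURCE B (Python) =====
-- def break_at_periods(s):
--     parts = s.split(".")
--     return [p + "." for p in parts[:-1]]
-- ===== Notes on version B (the rewrite author's own statement) =====
-- stated objective: faster
-- what changed: Replaces the enumerate-all-period-indices pass plus a moving-cursor slicing loop with a single str.split on the period followed by a comprehension that reattaches the period to every piece except the last (parts[:-1]), which drops trailing text after the final period exactly as A does.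
import Mathlib
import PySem

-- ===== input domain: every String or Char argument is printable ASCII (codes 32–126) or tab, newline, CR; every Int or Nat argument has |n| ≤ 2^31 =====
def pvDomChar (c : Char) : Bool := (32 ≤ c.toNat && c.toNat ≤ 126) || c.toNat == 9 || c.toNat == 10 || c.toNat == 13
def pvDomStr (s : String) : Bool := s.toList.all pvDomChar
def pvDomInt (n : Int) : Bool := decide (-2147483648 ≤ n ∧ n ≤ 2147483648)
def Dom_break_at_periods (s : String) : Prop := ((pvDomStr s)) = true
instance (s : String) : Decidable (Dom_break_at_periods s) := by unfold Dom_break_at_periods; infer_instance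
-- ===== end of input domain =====

-- B replaces A's period-index scan + moving-cursor slicing with split('.') and a
-- comprehension reattaching '.' to each piece but the last (idiomatic; same O(n) cost).


-- ===== PORT A =====
def break_at_periods (s : String) : List String :=
  let period_indices : List Int :=
    ((PySem.List.enumerate s.toList).filter (fun p => p.2 == '.')).map (fun p => p.1)
  (period_indices.foldl
    (fun (st : List String × Int) elem =>
      (st.1 ++ [PySem.Str.slice s (some st.2) (some (elem + 1))], elem + 1))
    ([], 0)).1

-- ===== PORT B =====
def break_at_periods_alt (s : String) : List String :=
  let parts : List String := (PySem.Str.split? s ".").getD []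
  (PySem.List.slice parts none (some (-1))).map (fun p => p ++ ".")

-- ===== PRECONDITION & SPEC =====
def Spec_break_at_periods (s : String) (out : List String) : Prop := out = break_at_periods_alt s
instance (s : String) (out : List String) : Decidable (Spec_break_at_periods s out) := by unfold Spec_break_at_periods; infer_instance

-- ===== CLAIM (what is proved, stated in full; the proofs are below) =====
def Claim_equal_break_at_periods : Prop := ∀ (s : String), Dom_break_at_periods s → Spec_break_at_periods s (break_at_periods s)

-- ===== LEMMAS AND PROOFS =====

-- split into pieces at '.', Python-split style: first piece and remaining pieces
def pvParts : List Char → List Char × List (List Char)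
  | [] => ([], [])
  | c :: t =>
    if c = '.' then ([], (pvParts t).1 :: (pvParts t).2)
    else (c :: (pvParts t).1, (pvParts t).2)

-- common spec: the substrings ending at each period, `pre` = chars of the current piece so far
def pvG : List Char → List Char → List (List Char)
  | _, [] => []
  | pre, c :: t => if c = '.' then (pre ++ ['.']) :: pvG [] t else pvG (pre ++ [c]) t

lemma pvParts_cons_dot (t : List Char) :
    pvParts ('.' :: t) = ([], (pvParts t).1 :: (pvParts t).2) := by simp [pvParts]

lemma pvParts_cons_ne {c : Char} (t : List Char) (hc : c ≠ '.') :
    pvParts (c :: t) = (c :: (pvParts t).1, (pvParts t).2) := by simp [pvParts, hc]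

lemma pvG_cons_dot (pre t : List Char) :
    pvG pre ('.' :: t) = (pre ++ ['.']) :: pvG [] t := by simp [pvG]

lemma pvG_cons_ne {c : Char} (pre t : List Char) (hc : c ≠ '.') :
    pvG pre (c :: t) = pvG (pre ++ [c]) t := by simp [pvG, hc]

lemma pv_take_succ_of_drop {α : Type} (l : List α) (m : Nat) (y : α) (ys : List α)
    (h : l.drop m = y :: ys) : l.take (m + 1) = l.take m ++ [y] := by
  have hm : l[m]? = some y := by
    have h0 : (l.drop m)[0]? = l[m]? := by simp [List.getElem?_drop]
    rw [h] at h0; simpa using h0.symm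
  simp [List.take_add_one, hm]

lemma pv_go_spec (l : List Char) : ∀ (fuel : Nat) (cur : List Char) (acc : List (List Char)),
    l.length < fuel →
    PySem.Chars.splitOn.go ['.'] fuel l cur acc
      = acc.reverse ++ (cur.reverse ++ (pvParts l).1) :: (pvParts l).2 := by
  induction l with
  | nil =>
    intro fuel cur acc hf
    match fuel with
    | fuel + 1 => simp [PySem.Chars.splitOn.go, pvParts]
  | cons c t ih =>
    intro fuel cur acc hf
    match fuel with
    | fuel + 1 =>
      by_cases hc : c = '.'
      · subst hc
        have hpre : List.isPrefixOf ['.'] ('.' :: t) = true := by simp [List.isPrefixOf]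
        simp only [PySem.Chars.splitOn.go, hpre, if_pos]
        rw [show List.drop (['.'] : List Char).length ('.' :: t) = t from rfl]
        rw [ih fuel [] (cur.reverse :: acc) (by simpa using Nat.lt_of_succ_lt_succ hf)]
        simp [pvParts_cons_dot]
      · have hpre : List.isPrefixOf ['.'] (c :: t) = false := by
          simp [List.isPrefixOf]; exact fun h => (hc h.symm).elim
        simp only [PySem.Chars.splitOn.go, hpre, Bool.false_eq_true, if_false]
        rw [ih fuel (c :: cur) acc (by simpa using Nat.lt_of_succ_lt_succ hf)]
        simp [pvParts_cons_ne t hc]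

lemma pv_splitOn_eq (cs : List Char) :
    PySem.Chars.splitOn cs ['.'] = (pvParts cs).1 :: (pvParts cs).2 := by
  unfold PySem.Chars.splitOn
  rw [pv_go_spec cs (cs.length + 1) [] [] (by omega)]
  simp

lemma pv_B_eq (cs : List Char) : ∀ (pre : List Char),
    (((pre ++ (pvParts cs).1) :: (pvParts cs).2).dropLast).map (· ++ ['.']) = pvG pre cs := by
  induction cs with
  | nil => intro pre; simp [pvParts, pvG]
  | cons c t ih =>
    intro pre
    by_cases hc : c = '.'
    · subst hc
      rw [pvParts_cons_dot, pvG_cons_dot]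
      rw [List.dropLast_cons₂]
      simp only [List.map_cons]
      rw [← ih []]
      simp
    · rw [pvParts_cons_ne t hc, pvG_cons_ne pre t hc]
      rw [← ih (pre ++ [c])]
      simp

lemma pv_map_toList_inj {xs ys : List String} (h : xs.map String.toList = ys.map String.toList) :
    xs = ys :=
  (List.map_injective_iff.mpr (fun _ _ hab => String.toList_inj.mp hab)) h

lemma pv_A_spec (s : String) : ∀ (t : List Char) (k : Nat), s.toList.drop k = t →
    ∀ (p : Nat), p ≤ k → ∀ (acc : List String),
    (((((PySem.List.enumerate t (k : Int)).filter (fun q => q.2 == '.')).map (fun q => q.1)).foldl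
      (fun (st : List String × Int) elem =>
        (st.1 ++ [PySem.Str.slice s (some st.2) (some (elem + 1))], elem + 1))
      (acc, (p : Int))).1).map String.toList
    = acc.map String.toList ++ pvG ((s.toList.drop p).take (k - p)) t := by
  intro t
  induction t with
  | nil => intro k hk p hp acc; simp [pvG]
  | cons c t ih =>
    intro k hk p hp acc
    have hk' : s.toList.drop (k + 1) = t := by
      have : s.toList.drop (k + 1) = (s.toList.drop k).drop 1 := by
        rw [List.drop_drop]
      rw [this, hk]; rfl
    have hck : (s.toList.drop p).drop (k - p) = c :: t := by
      rw [List.drop_drop]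
      have : p + (k - p) = k := by omega
      rw [this, hk]
    rw [PySem.List.enumerate_cons]
    by_cases hc : c = '.'
    · subst hc
      simp only [List.filter_cons, List.map_cons, List.foldl_cons, beq_self_eq_true, if_pos]
      have hcast : ((k : Int) + 1) = ((k + 1 : Nat) : Int) := by push_cast; ring
      rw [hcast, ih (k + 1) hk' (k + 1) (by omega)
        (acc ++ [PySem.Str.slice s (some (p : Int)) (some ((k + 1 : Nat) : Int))])]
      have hslice : (PySem.Str.slice s (some (p : Int)) (some ((k + 1 : Nat) : Int))).toList
          = (s.toList.drop p).take (k - p) ++ ['.'] := by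
        rw [PySem.Str.toList_slice]
        simp only [PySem.Chars.slice_eq_listSlice, PySem.List.slice_natCast]
        have h1 : k + 1 - p = (k - p) + 1 := by omega
        rw [h1]
        exact pv_take_succ_of_drop _ _ _ _ hck
      simp only [List.map_append, List.map_cons, List.map_nil, hslice]
      rw [pvG_cons_dot]
      simp
    · simp only [List.filter_cons]
      have hdec : (c == '.') = false := by simpa using hc
      simp only [hdec, Bool.false_eq_true, if_false]
      have hcast : ((k : Int) + 1) = ((k + 1 : Nat) : Int) := by push_cast; ring
      rw [hcast, ih (k + 1) hk' p (by omega) acc]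
      have htake : (s.toList.drop p).take (k + 1 - p) = (s.toList.drop p).take (k - p) ++ [c] := by
        have h1 : k + 1 - p = (k - p) + 1 := by omega
        rw [h1]
        exact pv_take_succ_of_drop _ _ _ _ hck
      rw [htake, pvG_cons_ne _ t hc]

lemma pv_A_eq (s : String) : (break_at_periods s).map String.toList = pvG [] s.toList := by
  unfold break_at_periods
  have := pv_A_spec s s.toList 0 (by simp) 0 (le_refl 0) []
  simpa using this

lemma pv_list_slice_neg_one {α : Type} (xs : List α) :
    PySem.List.slice xs none (some (-1)) = xs.dropLast := by
  simp [PySem.List.slice, List.dropLast_eq_take]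

lemma pv_B_final (s : String) :
    (break_at_periods_alt s).map String.toList = pvG [] s.toList := by
  unfold break_at_periods_alt
  have hsplit : PySem.Str.split? s "."
      = some ((PySem.Chars.splitOn s.toList ['.']).map String.ofList) := by
    unfold PySem.Str.split?
    simp [PySem.Chars.split?]
  rw [hsplit]
  simp only [Option.getD_some]
  rw [pv_list_slice_neg_one, ← List.map_dropLast, pv_splitOn_eq]
  rw [List.map_map, List.map_map]
  have hfun : ((String.toList ∘ fun p : String => p ++ ".") ∘ String.ofList)
      = (fun p : List Char => p ++ ['.']) := by
    funext p
    simp [String.toList_append]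
  rw [hfun, ← pv_B_eq s.toList []]
  simp

-- ===== VERDICT (by name: the statement is the Claim_ definition above) =====
theorem break_at_periods_spec : Claim_equal_break_at_periods := by
  intro s _
  unfold Spec_break_at_periods
  apply pv_map_toList_inj
  rw [pv_A_eq, pv_B_final]
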